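-- pv_equiv track=rewrite | github.com/RunjeethNikam/Leetcode | maximum-points-inside-the-square.py | maxPointsInsideSquare
-- ===== SOURCE A (Python) =====
-- from typing import List
-- from collections import defaultdict
--
-- def maxPointsInsideSquare(points: List[List[int]], s: str) -> int:
--
--     dp = defaultdict(list)
--     for tag, (x, y) in zip(s, points):
--         dp[max(abs(x), abs(y))].append(tag)
--
--     count = 0
--     seen_tags = set()
--     dp = sorted(dp.items())
--     for _, tags in dp:
--         if len(set(tags)) != len(tags) or any([tag in seen_tags for tag in tags]):
--             break
--         else:
--             count += len(tags)
--             seen_tags.update(tags)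
--     return count
-- ===== SOURCE B (Python) =====
-- from typing import List
--
-- def maxPointsInsideSquare(points: List[List[int]], s: str) -> int:
--     # One pass: per-tag minimum Chebyshev distance + running collision limit
--     # (smallest max(d_i, d_j) over two same-tagged points); then count d < limit.
--     first = {}
--     limit = None
--     ds = []
--     for tag, (x, y) in zip(s, points):
--         d = max(abs(x), abs(y))
--         ds.append(d)
--         m = first.get(tag)
--         if m is None:
--             first[tag] = d
--         else:
--             c = m if m > d else d
--             if limit is None or c < limit:
--                 limit = c
--             if d < m:
--                 first[tag] = d
--     if limit is None:
--         return len(ds)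
--     count = 0
--     for d in ds:
--         if d < limit:
--             count += 1
--     return count
-- ===== Notes on version B (the rewrite author's own statement) =====
-- stated objective: faster
-- what changed: A groups points by Chebyshev distance in a dict, sorts the distance groups, and scans them accumulating counts until a tag collision; B makes one unsorted pass keeping per-tag the minimum distance and a running collision limit (smallest max of two same-tagged distances), then counts the distances strictly below that limit, removing the sort.
import Mathlib
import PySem

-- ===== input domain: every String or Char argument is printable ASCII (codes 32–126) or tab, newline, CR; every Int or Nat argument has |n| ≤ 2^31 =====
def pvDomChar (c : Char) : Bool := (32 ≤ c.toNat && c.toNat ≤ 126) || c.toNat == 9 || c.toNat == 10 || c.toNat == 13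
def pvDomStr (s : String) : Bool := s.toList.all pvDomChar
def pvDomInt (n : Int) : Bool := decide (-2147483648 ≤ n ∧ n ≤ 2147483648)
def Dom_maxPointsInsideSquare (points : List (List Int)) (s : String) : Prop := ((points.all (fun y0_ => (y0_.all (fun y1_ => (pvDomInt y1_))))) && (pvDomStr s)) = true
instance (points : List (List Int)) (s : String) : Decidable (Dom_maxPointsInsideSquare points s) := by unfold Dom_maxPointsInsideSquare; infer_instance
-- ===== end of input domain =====

-- B replaces A's group-by-distance + sort + break-on-collision scan with a single O(n) pass keeping,
-- per tag, the smallest Chebyshev distance and a running collision limit, then counts distances below it.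

-- ===== PORT A =====
-- the for-loop with `break`: recursion over the sorted (distance, tags) groups
def pvScanA : List (Int × List Char) → PySem.Set Char → Int → Int
  | [], _, count => count
  | (_, tags) :: rest, seen, count =>
    if (PySem.Set.ofList tags).length ≠ tags.length ∨ tags.any (fun t => PySem.Set.contains seen t) then
      count
    else
      pvScanA rest (PySem.Set.update seen tags) (count + (tags.length : Int))

def maxPointsInsideSquare (points : List (List Int)) (s : String) : Int :=
  -- `for tag, (x, y) in zip(s, points)`: the unpack needs 2-element points (Pre_); x, y read by index
  let dp : PySem.Dict Int (List Char) :=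
    (s.toList.zip points).foldl
      (fun d p =>
        let x := PySem.List.pyGetD p.2 0 0
        let y := PySem.List.pyGetD p.2 1 0
        d.modify (max |x| |y|) [] (fun l => l ++ [p.1]))
      PySem.Dict.empty
  -- sorted(dp.items()): dict keys are distinct, so Python's tuple order here is the order of the first components
  let dpSorted := PySem.List.sorted dp.items (fun p => p.1) false
  pvScanA dpSorted PySem.Set.empty 0

-- ===== PORT B =====
def pvStepB (st : PySem.Dict Char Int × Option Int × List Int) (p : Char × List Int) :
    PySem.Dict Char Int × Option Int × List Int :=
  let x := PySem.List.pyGetD p.2 0 0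
  let y := PySem.List.pyGetD p.2 1 0
  let d := max |x| |y|
  let ds := st.2.2 ++ [d]
  match st.1.get? p.1 with
  | none => (st.1.insert p.1 d, st.2.1, ds)
  | some m =>
    let c := if m > d then m else d
    let limit : Option Int :=
      match st.2.1 with
      | none => some c
      | some L => if c < L then some c else some L
    let first := if d < m then st.1.insert p.1 d else st.1
    (first, limit, ds)

def maxPointsInsideSquare_alt (points : List (List Int)) (s : String) : Int :=
  let st := (s.toList.zip points).foldl pvStepB (PySem.Dict.empty, none, [])
  match st.2.1 with
  | none => (st.2.2.length : Int)
  | some L => st.2.2.foldl (fun c d => if d < L then c + 1 else c) 0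

-- ===== PRECONDITION & SPEC =====
-- Python's `tag, (x, y) = ...` raises ValueError unless each zipped point has exactly 2 coordinates
def Pre_maxPointsInsideSquare (points : List (List Int)) (s : String) : Prop :=
  ∀ p ∈ s.toList.zip points, p.2.length = 2
instance (points : List (List Int)) (s : String) : Decidable (Pre_maxPointsInsideSquare points s) := by unfold Pre_maxPointsInsideSquare; infer_instance
def pvWitness_maxPointsInsideSquare : List (List Int) × String := ([[1, 2], [-3, 1], [2, 2]], "aba")

def Spec_maxPointsInsideSquare (points : List (List Int)) (s : String) (out : Int) : Prop := out = maxPointsInsideSquare_alt points s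
instance (points : List (List Int)) (s : String) (out : Int) : Decidable (Spec_maxPointsInsideSquare points s out) := by unfold Spec_maxPointsInsideSquare; infer_instance

-- ===== CLAIM (what is proved, stated in full; the proofs are below) =====
def Claim_equal_maxPointsInsideSquare : Prop := ∀ (points : List (List Int)) (s : String), Dom_maxPointsInsideSquare points s → Pre_maxPointsInsideSquare points s → Spec_maxPointsInsideSquare points s (maxPointsInsideSquare points s)

-- ===== LEMMAS AND PROOFS =====

-- Chebyshev distance of a point, exactly as both ports read it
def pvCheb (q : List Int) : Int := max |PySem.List.pyGetD q 0 0| |PySem.List.pyGetD q 1 0|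

-- the (tag, distance) list both programs conceptually work on
def pvP (points : List (List Int)) (s : String) : List (Char × Int) :=
  (s.toList.zip points).map (fun p => (p.1, pvCheb p.2))

-- tags of the entries at distance d, in order
def pvTagsAt (P : List (Char × Int)) (d : Int) : List Char :=
  (P.filter (fun e => e.2 == d)).map (fun e => e.1)

-- all collision candidates: max of the two distances of any two same-tagged entries
def pvCandList : List (Char × Int) → List Int
  | [] => []
  | x :: xs => (xs.filter (fun y => y.1 == x.1)).map (fun y => max x.2 y.2) ++ pvCandList xs

-- the common reference value
def pvAnswer (P : List (Char × Int)) : Int :=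
  match (pvCandList P).min? with
  | none => (P.length : Int)
  | some L => ((P.filter (fun e => e.2 < L)).length : Int)

-- A's break condition at distance group d, rephrased on P
def pvBad (P : List (Char × Int)) (d : Int) : Bool :=
  decide (¬ (pvTagsAt P d).Nodup ∨ ∃ t ∈ pvTagsAt P d, ∃ e ∈ P, e.1 = t ∧ e.2 < d)

theorem pvMin?_congr_perm (l1 l2 : List Int) (h : l1.Perm l2) : l1.min? = l2.min? := by
  cases h2 : l2.min? with
  | none =>
    rw [List.min?_eq_none_iff] at h2 ⊢
    subst h2; exact h.eq_nil
  | some m =>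
    have hm := List.min?_eq_some_iff.mp h2
    exact List.min?_eq_some_iff.mpr ⟨h.mem_iff.mpr hm.1, fun b hb => hm.2 b (h.mem_iff.mp hb)⟩

theorem pvCandList_append (P : List (Char × Int)) (a : Char × Int) :
    (pvCandList (P ++ [a])).Perm
      (pvCandList P ++ (P.filter (fun y => y.1 == a.1)).map (fun y => max y.2 a.2)) := by
  induction P with
  | nil => simp [pvCandList]
  | cons x xs ih =>
    rw [List.perm_iff_count]
    intro c
    have hc := List.perm_iff_count.mp ih c
    simp only [List.count_append] at hc
    simp only [List.cons_append, pvCandList, List.filter_append, List.map_append,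
      List.filter_cons, List.count_append, hc]
    by_cases h : a.1 = x.1
    · have h1 : (a.1 == x.1) = true := by simp [h]
      have h2 : (x.1 == a.1) = true := by simp [h]
      simp only [h1, h2, if_pos, List.filter_nil, List.map_cons, List.map_nil,
        List.count_cons, List.count_nil, List.count_append]
      omega
    · have h1 : (a.1 == x.1) = false := by simp [h]
      have h2 : (x.1 == a.1) = false := by simp; exact fun e => h e.symm
      simp only [h1, h2, Bool.false_eq_true, if_false, List.filter_nil, List.map_nil,
        List.count_nil]
      omega

theorem pvMin?_append_singleton (xs : List Int) (d : Int) :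
    (xs ++ [d]).min? = some (match xs.min? with | none => d | some m => min m d) := by
  cases h : xs.min? with
  | none => simp_all [List.min?_eq_none_iff]
  | some m =>
    have hred : (match (some m : Option Int) with | none => d | some m => min m d) = min m d := rfl
    rw [hred]
    have hm := List.min?_eq_some_iff.mp h
    rw [List.min?_eq_some_iff]
    constructor
    · rcases min_choice m d with hc | hc <;> rw [hc] <;> simp [hm.1]
    · intro b hb
      rcases List.mem_append.mp hb with hb | hb
      · exact le_trans (min_le_left m d) (hm.2 b hb)
      · simp at hb; simpa [hb] using min_le_right m d

theorem pvMin?_map_max (xs : List Int) (m d : Int) (h : xs.min? = some m) :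
    (xs.map (fun v => max v d)).min? = some (max m d) := by
  have hm := List.min?_eq_some_iff.mp h
  rw [List.min?_eq_some_iff]
  constructor
  · exact List.mem_map.mpr ⟨m, hm.1, rfl⟩
  · intro b hb
    rcases List.mem_map.mp hb with ⟨v, hv, rfl⟩
    exact max_le_max (hm.2 v hv) le_rfl

theorem pvMin?_append (u v : List Int) :
    (u ++ v).min? = match u.min?, v.min? with
      | none, b => b | some a, none => some a | some a, some b => some (min a b) := by
  cases hu : u.min? with
  | none => rw [List.min?_eq_none_iff] at hu; subst hu; simp
  | some a =>
    cases hv : v.min? with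
    | none => rw [List.min?_eq_none_iff] at hv; subst hv; simpa using hu
    | some b =>
      have ha := List.min?_eq_some_iff.mp hu
      have hb := List.min?_eq_some_iff.mp hv
      show (u ++ v).min? = some (min a b)
      rw [List.min?_eq_some_iff]
      constructor
      · rcases min_choice a b with hc | hc <;> rw [hc] <;> simp [ha.1, hb.1]
      · intro x hx
        rcases List.mem_append.mp hx with hx | hx
        · exact le_trans (min_le_left a b) (ha.2 x hx)
        · exact le_trans (min_le_right a b) (hb.2 x hx)

theorem pvIfMax (m d : Int) : (if m > d then m else d) = max m d := by
  rcases le_total m d with h | h <;> simp [max_def] <;> omega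

theorem pvStepB_none (st : PySem.Dict Char Int × Option Int × List Int) (p : Char × List Int)
    (h : st.1.get? p.1 = none) :
    pvStepB st p = (st.1.insert p.1 (pvCheb p.2), st.2.1, st.2.2 ++ [pvCheb p.2]) := by
  unfold pvStepB
  rw [h]
  rfl

theorem pvStepB_some (st : PySem.Dict Char Int × Option Int × List Int) (p : Char × List Int)
    (m : Int) (h : st.1.get? p.1 = some m) :
    pvStepB st p = ((if pvCheb p.2 < m then st.1.insert p.1 (pvCheb p.2) else st.1),
      (match st.2.1 with
       | none => some (max m (pvCheb p.2))
       | some L => if max m (pvCheb p.2) < L then some (max m (pvCheb p.2)) else some L),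
      st.2.2 ++ [pvCheb p.2]) := by
  unfold pvStepB
  rw [h]
  simp only [pvIfMax]
  rfl

theorem pvFoldB (l : List (Char × List Int)) :
    (l.foldl pvStepB (PySem.Dict.empty, none, [])).2.2
        = (l.map (fun p => (p.1, pvCheb p.2))).map (fun e => e.2)
    ∧ (l.foldl pvStepB (PySem.Dict.empty, none, [])).2.1
        = (pvCandList (l.map (fun p => (p.1, pvCheb p.2)))).min?
    ∧ ∀ t : Char, (l.foldl pvStepB (PySem.Dict.empty, none, [])).1.get? t
        = (((l.map (fun p => (p.1, pvCheb p.2))).filter (fun e => e.1 == t)).map (fun e => e.2)).min? := by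
  induction l using List.reverseRecOn with
  | nil => exact ⟨rfl, rfl, fun t => rfl⟩
  | append_singleton l a ih =>
    obtain ⟨ih1, ih2, ih3⟩ := ih
    simp only [List.foldl_append, List.foldl_cons, List.foldl_nil, List.map_append,
      List.map_cons, List.map_nil]
    set st := l.foldl pvStepB (PySem.Dict.empty, none, []) with hst
    set P := l.map (fun p => (p.1, pvCheb p.2)) with hP
    have hperm := pvMin?_congr_perm _ _ (pvCandList_append P (a.1, pvCheb a.2))
    dsimp only at hperm
    have hFtg := ih3 a.1
    have hnc : (P.filter (fun y => y.1 == a.1)).map (fun y => max y.2 (pvCheb a.2))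
        = ((P.filter (fun e => e.1 == a.1)).map (fun e => e.2)).map (fun v => max v (pvCheb a.2)) := by
      simp [List.map_map, Function.comp]
    cases hg : st.1.get? a.1 with
    | none =>
      have hF : ((P.filter (fun e => e.1 == a.1)).map (fun e => e.2)) = [] := by
        rw [← List.min?_eq_none_iff, ← hFtg, hg]
      rw [pvStepB_none st a hg]
      refine ⟨by simp [ih1], ?_, ?_⟩
      · rw [hperm, hnc, hF]
        simpa using ih2
      · intro t
        by_cases ht : t = a.1
        · subst ht
          rw [PySem.Dict.get?_insert_self]
          have hfil2 : (((P ++ [(a.1, pvCheb a.2)]).filter (fun e => e.1 == a.1)).map (fun e => e.2))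
              = ((P.filter (fun e => e.1 == a.1)).map (fun e => e.2)) ++ [pvCheb a.2] := by
            simp [List.filter_append]
          rw [hfil2, hF]
          simp
        · rw [PySem.Dict.get?_insert_of_ne _ _ ht, ih3 t]
          have hfil : ((a.1, pvCheb a.2).1 == t) = false := by simp; exact fun e => ht e.symm
          simp [List.filter_append, hfil]
    | some m =>
      have hFm : ((P.filter (fun e => e.1 == a.1)).map (fun e => e.2)).min? = some m := by
        rw [← hFtg, hg]
      rw [pvStepB_some st a m hg]
      refine ⟨by simp [ih1], ?_, ?_⟩
      · rw [hperm, hnc, pvMin?_append, pvMin?_map_max _ _ _ hFm, ← ih2]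
        cases hL : st.2.1 with
        | none => rfl
        | some L =>
          show (if max m (pvCheb a.2) < L then some (max m (pvCheb a.2)) else some L)
              = some (min L (max m (pvCheb a.2)))
          split_ifs with h <;> congr 1 <;> omega
      · intro t
        by_cases ht : t = a.1
        · subst ht
          have hred : (match (some m : Option Int) with
              | none => pvCheb a.2 | some m => min m (pvCheb a.2)) = min m (pvCheb a.2) := rfl
          have hmin : (((P.filter (fun e => e.1 == a.1)).map (fun e => e.2)) ++ [pvCheb a.2]).min?
              = some (min m (pvCheb a.2)) := by
            rw [pvMin?_append_singleton, hFm, hred]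
          have hfil2 : (((P ++ [(a.1, pvCheb a.2)]).filter (fun e => e.1 == a.1)).map (fun e => e.2))
              = ((P.filter (fun e => e.1 == a.1)).map (fun e => e.2)) ++ [pvCheb a.2] := by
            simp [List.filter_append]
          rw [hfil2, hmin]
          by_cases hdm : pvCheb a.2 < m
          · rw [if_pos hdm, PySem.Dict.get?_insert_self]
            congr 1
            omega
          · rw [if_neg hdm, hg]
            congr 1
            omega
        · have hfil : ((a.1, pvCheb a.2).1 == t) = false := by simp; exact fun e => ht e.symm
          have hrest : (((P ++ [(a.1, pvCheb a.2)]).filter (fun e => e.1 == t)).map (fun e => e.2)).min?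
              = st.1.get? t := by
            rw [ih3 t]; simp [List.filter_append, hfil]
          by_cases hdm : pvCheb a.2 < m
          · rw [if_pos hdm, PySem.Dict.get?_insert_of_ne _ _ ht, hrest]
          · rw [if_neg hdm, hrest]

theorem pvAlt_eq_answer (points : List (List Int)) (s : String) :
    maxPointsInsideSquare_alt points s = pvAnswer (pvP points s) := by
  obtain ⟨h1, h2, -⟩ := pvFoldB (s.toList.zip points)
  show (match ((s.toList.zip points).foldl pvStepB (PySem.Dict.empty, none, [])).2.1 with
    | none => (((s.toList.zip points).foldl pvStepB (PySem.Dict.empty, none, [])).2.2.length : Int)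
    | some L => ((s.toList.zip points).foldl pvStepB (PySem.Dict.empty, none, [])).2.2.foldl
        (fun c d => if d < L then c + 1 else c) 0) = pvAnswer (pvP points s)
  rw [h1, h2]
  unfold pvAnswer pvP
  cases hmin : (pvCandList ((s.toList.zip points).map (fun p => (p.1, pvCheb p.2)))).min? with
  | none => simp
  | some L =>
    dsimp only
    rw [PySem.List.foldl_ite_add_one (fun d => d < L)]
    simp only [List.countP_map, ← List.countP_eq_length_filter, zero_add]
    norm_cast

-- pair-of-distinct-members sublist extraction
theorem pvPair_sublist {α : Type} (l : List α) (a b : α) (ha : a ∈ l) (hb : b ∈ l) (hne : a ≠ b) :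
    [a, b].Sublist l ∨ [b, a].Sublist l := by
  induction l with
  | nil => simp at ha
  | cons x xs ih =>
    rcases List.mem_cons.mp ha with rfl | ha'
    · have hb' : b ∈ xs := by
        rcases List.mem_cons.mp hb with rfl | h
        · exact absurd rfl hne
        · exact h
      exact Or.inl (List.cons_sublist_cons.mpr (List.singleton_sublist.mpr hb'))
    · rcases List.mem_cons.mp hb with rfl | hb'
      · exact Or.inr (List.cons_sublist_cons.mpr (List.singleton_sublist.mpr ha'))
      · rcases ih ha' hb' with h | h
        · exact Or.inl (h.cons x)
        · exact Or.inr (h.cons x)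

theorem pvMem_candList (P : List (Char × Int)) (d : Int) :
    d ∈ pvCandList P ↔ ∃ x y : Char × Int, [x, y].Sublist P ∧ x.1 = y.1 ∧ max x.2 y.2 = d := by
  induction P with
  | nil => simp [pvCandList]
  | cons z zs ih =>
    simp only [pvCandList, List.mem_append, ih]
    constructor
    · rintro (h | ⟨x, y, hs, ht, hm⟩)
      · rcases List.mem_map.mp h with ⟨y, hy, rfl⟩
        rcases List.mem_filter.mp hy with ⟨hy', ht⟩
        exact ⟨z, y, List.cons_sublist_cons.mpr (List.singleton_sublist.mpr hy'),
          (beq_iff_eq.mp ht).symm, rfl⟩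
      · exact ⟨x, y, hs.cons z, ht, hm⟩
    · rintro ⟨x, y, hs, ht, hm⟩
      rcases List.sublist_cons_iff.mp hs with hs' | ⟨r, hr, hrs⟩
      · exact Or.inr ⟨x, y, hs', ht, hm⟩
      · obtain ⟨rfl, rfl⟩ : x = z ∧ r = [y] := by
          constructor <;> [skip; skip] <;> injection hr with h1 h2 <;> simp_all
        exact Or.inl (List.mem_map.mpr ⟨y, List.mem_filter.mpr
          ⟨List.singleton_sublist.mp hrs, beq_iff_eq.mpr ht.symm⟩, hm⟩)

theorem pvNodupIffLen (xs : List Char) : (PySem.Set.ofList xs).length = xs.length ↔ xs.Nodup := by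
  constructor
  · intro h
    have hsub : (PySem.Set.ofList xs) ⊆ xs := fun a ha => (PySem.Set.mem_ofList xs a).mp ha
    have hsp : (PySem.Set.ofList xs).Subperm xs := (PySem.Set.nodup_ofList xs).subperm hsub
    have hperm := hsp.perm_of_length_le (by omega)
    exact hperm.nodup (PySem.Set.nodup_ofList xs)
  · intro h
    rw [PySem.Set.ofList_eq_self_of_nodup xs h]

theorem pvBad_iff (P : List (Char × Int)) (d : Int) :
    pvBad P d = true ↔ d ∈ pvCandList P := by
  rw [pvMem_candList]
  simp only [pvBad, decide_eq_true_eq]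
  constructor
  · rintro (hnd | ⟨t, ht, e, he, het, hlt⟩)
    · obtain ⟨t, h2⟩ : ∃ t, 2 ≤ (pvTagsAt P d).count t := by
        by_contra hc
        push_neg at hc
        exact hnd (List.nodup_iff_count_le_one.mpr (fun a => by have := hc a; omega))
      have hrep : (List.replicate 2 t).Sublist (pvTagsAt P d) := List.replicate_sublist_iff.mpr h2
      unfold pvTagsAt at hrep
      obtain ⟨l', hl', heq⟩ := List.sublist_map_iff.mp hrep
      rcases l' with _ | ⟨x, _ | ⟨y, _ | ⟨z, tl⟩⟩⟩ <;> simp at heq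
      obtain ⟨hx1, hy1⟩ := heq
      have hx : x ∈ P.filter (fun e => e.2 == d) := hl'.subset (by simp)
      have hy : y ∈ P.filter (fun e => e.2 == d) := hl'.subset (by simp)
      have hx2 : x.2 = d := by simpa using (List.mem_filter.mp hx).2
      have hy2 : y.2 = d := by simpa using (List.mem_filter.mp hy).2
      refine ⟨x, y, hl'.trans List.filter_sublist, by rw [← hx1, ← hy1], by rw [hx2, hy2]; simp⟩
    · rcases List.mem_map.mp ht with ⟨x, hxf, hx1⟩
      have hx : x ∈ P := (List.mem_filter.mp hxf).1
      have hx2 : x.2 = d := by simpa using (List.mem_filter.mp hxf).2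
      have hne : x ≠ e := by
        intro hEq
        rw [← hEq] at hlt
        omega
      have h1 : x.1 = e.1 := by rw [hx1, het]
      rcases pvPair_sublist P x e hx he hne with hs | hs
      · exact ⟨x, e, hs, h1, by rw [hx2]; omega⟩
      · exact ⟨e, x, hs, h1.symm, by rw [hx2]; omega⟩
  · rintro ⟨x, y, hs, ht, hm⟩
    have hx : x ∈ P := hs.subset (by simp)
    have hy : y ∈ P := hs.subset (by simp)
    by_cases hxd : x.2 = d
    · by_cases hyd : y.2 = d
      · -- both distances equal d: duplicate inside the group
        left
        have hsub2 : [x, y].Sublist (P.filter (fun e => e.2 == d)) := by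
          have hflt := hs.filter (fun e => e.2 == d)
          simpa [List.filter_cons, hxd, hyd] using hflt
        have hsub3 : [x.1, y.1].Sublist (pvTagsAt P d) := by
          unfold pvTagsAt
          simpa using List.Sublist.map (fun e => e.1) hsub2
        intro hnd
        have hcnt := hsub3.count_le x.1
        simp [ht] at hcnt
        have := List.nodup_iff_count_le_one.mp hnd y.1
        omega
      · -- y.2 < d = x.2 : x is in the group, y strictly closer
        right
        refine ⟨x.1, ?_, y, hy, ht.symm, by omega⟩
        unfold pvTagsAt
        exact List.mem_map.mpr ⟨x, List.mem_filter.mpr ⟨hx, by simp [hxd]⟩, rfl⟩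
    · -- x.2 < d = y.2 : y is in the group, x strictly closer
      have hyd : y.2 = d := by omega
      right
      refine ⟨y.1, ?_, x, hx, ht, by omega⟩
      unfold pvTagsAt
      exact List.mem_map.mpr ⟨y, List.mem_filter.mpr ⟨hy, by simp [hyd]⟩, rfl⟩

theorem pvCand_mem_dists (P : List (Char × Int)) (c : Int) (h : c ∈ pvCandList P) :
    c ∈ P.map (fun e => e.2) := by
  rcases (pvMem_candList P c).mp h with ⟨x, y, hs, _, hm⟩
  have hx : x ∈ P := hs.subset (by simp)
  have hy : y ∈ P := hs.subset (by simp)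
  rcases max_choice x.2 y.2 with hc | hc <;> rw [← hm, hc] <;> exact List.mem_map.mpr (by tauto)

theorem pvFind?_min (todo : List Int) (p : Int → Bool) (L : Int) (hsort : todo.Pairwise (· < ·))
    (h : todo.find? p = some L) : ∀ d ∈ todo, p d = true → L ≤ d := by
  induction todo with
  | nil => simp at h
  | cons x xs ih =>
    rcases List.pairwise_cons.mp hsort with ⟨hx, hxs⟩
    intro d hd hpd
    cases hpx : p x with
    | true =>
      rw [List.find?_cons_of_pos hpx] at h
      injection h with h; subst h
      rcases List.mem_cons.mp hd with rfl | hd'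
      · rfl
      · exact le_of_lt (hx d hd')
    | false =>
      rw [List.find?_cons_of_neg (by simp [hpx])] at h
      rcases List.mem_cons.mp hd with rfl | hd'
      · rw [hpx] at hpd; exact absurd hpd (by simp)
      · exact ih hxs h d hd' hpd

theorem pvSum_counts (D : List Int) (l : List (Char × Int)) (hD : D.Nodup)
    (hcov : ∀ e ∈ l, e.2 ∈ D) :
    (D.map (fun d => (pvTagsAt l d).length)).sum = l.length := by
  induction D generalizing l with
  | nil =>
    have : l = [] := List.eq_nil_iff_forall_not_mem.mpr (fun e he => by simpa using hcov e he)
    simp [this]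
  | cons d D' ih =>
    rcases List.nodup_cons.mp hD with ⟨hdD, hD'⟩
    have hcongr : ∀ d' ∈ D', pvTagsAt l d' = pvTagsAt (l.filter (fun e => !(e.2 == d))) d' := by
      intro d' hd'
      unfold pvTagsAt
      congr 1
      rw [List.filter_filter]
      apply List.filter_congr
      intro e _
      by_cases he : e.2 = d'
      · have hne : e.2 ≠ d := by
          intro hh
          have : d' = d := by omega
          exact hdD (this ▸ hd')
        simp [he]
        omega
      · simp [he]
    have hcongr' : ∀ d' ∈ D',
        (pvTagsAt l d').length = (pvTagsAt (l.filter (fun e => !(e.2 == d))) d').length :=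
      fun d' hd' => congrArg List.length (hcongr d' hd')
    have hcov2 : ∀ e ∈ l.filter (fun e => !(e.2 == d)), e.2 ∈ D' := by
      intro e he
      rcases List.mem_filter.mp he with ⟨hel, hne⟩
      rcases List.mem_cons.mp (hcov e hel) with h | h
      · simp at hne; exact absurd h hne
      · exact h
    rw [List.map_cons, List.sum_cons, List.map_congr_left hcongr',
      ih (l.filter (fun e => !(e.2 == d))) hD' hcov2]
    unfold pvTagsAt
    rw [List.length_map]
    have hsplit := List.length_eq_length_filter_add (l := l) (fun e => e.2 == d)
    omega

theorem pvScan_spec (P : List (Char × Int)) (todo : List Int) (seen : PySem.Set Char) (count : Int)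
    (hsort : todo.Pairwise (· < ·))
    (hmem : ∀ d ∈ P.map (fun e => e.2), d ∈ todo ∨ ∀ d' ∈ todo, d < d')
    (hseen : ∀ t : Char, PySem.Set.contains seen t = true ↔ ∃ e ∈ P, e.1 = t ∧ ∀ d' ∈ todo, e.2 < d') :
    pvScanA (todo.map (fun k => (k, pvTagsAt P k))) seen count =
      count + match todo.find? (pvBad P) with
        | none => ((todo.map (fun d => (pvTagsAt P d).length)).sum : Int)
        | some L => (((todo.filter (fun d => d < L)).map (fun d => (pvTagsAt P d).length)).sum : Int) := by
  induction todo generalizing seen count with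
  | nil => simp [pvScanA]
  | cons d rest ih =>
    rcases List.pairwise_cons.mp hsort with ⟨hdrest, hsort'⟩
    have hmemTags : ∀ t, t ∈ pvTagsAt P d ↔ ∃ e ∈ P, e.1 = t ∧ e.2 = d := by
      intro t
      unfold pvTagsAt
      simp only [List.mem_map, List.mem_filter]
      constructor
      · rintro ⟨e, ⟨heP, hed⟩, rfl⟩; exact ⟨e, heP, rfl, by simpa using hed⟩
      · rintro ⟨e, heP, rfl, hed⟩; exact ⟨e, ⟨heP, by simpa using hed⟩, rfl⟩
    have hcond : ((PySem.Set.ofList (pvTagsAt P d)).length ≠ (pvTagsAt P d).length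
        ∨ (pvTagsAt P d).any (fun t => PySem.Set.contains seen t) = true) ↔ pvBad P d = true := by
      simp only [pvBad, decide_eq_true_eq]
      constructor
      · rintro (h | h)
        · exact Or.inl (fun hnd => h ((pvNodupIffLen _).mpr hnd))
        · rcases List.any_eq_true.mp h with ⟨t, htg, hc⟩
          rcases (hseen t).mp hc with ⟨e, heP, he1, hlt⟩
          exact Or.inr ⟨t, htg, e, heP, he1, hlt d (by simp)⟩
      · rintro (h | ⟨t, htg, e, heP, he1, hlt⟩)
        · exact Or.inl (fun hlen => h ((pvNodupIffLen _).mp hlen))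
        · refine Or.inr (List.any_eq_true.mpr ⟨t, htg, (hseen t).mpr ⟨e, heP, he1, ?_⟩⟩)
          intro d' hd'
          rcases List.mem_cons.mp hd' with rfl | hd''
          · exact hlt
          · exact lt_trans hlt (hdrest d' hd'')
    rw [List.map_cons]
    simp only [pvScanA]
    by_cases hbad : pvBad P d = true
    · rw [if_pos (hcond.mpr hbad), List.find?_cons_of_pos hbad]
      have hfil : (d :: rest).filter (fun x => x < d) = [] := by
        rw [List.filter_eq_nil_iff]
        intro x hx
        rcases List.mem_cons.mp hx with rfl | hx'
        · simp
        · have := hdrest x hx'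
          simp
          omega
      dsimp only
      rw [hfil]
      simp
    · rw [if_neg (fun hc => hbad (hcond.mp hc)), List.find?_cons_of_neg (by simp [hbad])]
      have hmem' : ∀ d' ∈ P.map (fun e => e.2), d' ∈ rest ∨ ∀ x ∈ rest, d' < x := by
        intro d' hd'
        rcases hmem d' hd' with h | h
        · rcases List.mem_cons.mp h with rfl | h'
          · exact Or.inr (fun x hx => hdrest x hx)
          · exact Or.inl h'
        · exact Or.inr (fun x hx => h x (List.mem_cons_of_mem d hx))
      have hseen' : ∀ t : Char,
          PySem.Set.contains (PySem.Set.update seen (pvTagsAt P d)) t = true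
            ↔ ∃ e ∈ P, e.1 = t ∧ ∀ d' ∈ rest, e.2 < d' := by
        intro t
        rw [PySem.Set.contains_iff, PySem.Set.mem_update]
        constructor
        · rintro (hm | hm)
          · rcases (hseen t).mp ((PySem.Set.contains_iff seen t).mpr hm) with ⟨e, heP, he1, hlt⟩
            exact ⟨e, heP, he1, fun d' hd' => hlt d' (List.mem_cons_of_mem d hd')⟩
          · rcases (hmemTags t).mp hm with ⟨e, heP, he1, he2⟩
            exact ⟨e, heP, he1, fun d' hd' => by rw [he2]; exact hdrest d' hd'⟩
        · rintro ⟨e, heP, he1, hlt⟩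
          have hed : e.2 ∈ P.map (fun e => e.2) := List.mem_map.mpr ⟨e, heP, rfl⟩
          rcases hmem e.2 hed with hin | hsmall
          · rcases List.mem_cons.mp hin with he2 | hin'
            · exact Or.inr ((hmemTags t).mpr ⟨e, heP, he1, he2⟩)
            · exact absurd (hlt e.2 hin') (lt_irrefl _)
          · exact Or.inl ((PySem.Set.contains_iff seen t).mp
              ((hseen t).mpr ⟨e, heP, he1, fun d' hd' => hsmall d' hd'⟩))
      rw [ih (PySem.Set.update seen (pvTagsAt P d)) (count + ((pvTagsAt P d).length : Int))
        hsort' hmem' hseen']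
      cases hfr : rest.find? (pvBad P) with
      | none =>
        dsimp only
        simp only [List.map_cons, List.sum_cons]
        push_cast
        ring
      | some L =>
        have hdL : d < L := hdrest L (List.mem_of_find?_eq_some hfr)
        dsimp only
        rw [List.filter_cons_of_pos (by simp [hdL])]
        simp only [List.map_cons, List.sum_cons]
        push_cast
        ring

theorem pvA_eq_answer (points : List (List Int)) (s : String) :
    maxPointsInsideSquare points s = pvAnswer (pvP points s) := by
  show pvScanA
      (PySem.List.sorted
        ((s.toList.zip points).foldl
          (fun d p =>
            let x := PySem.List.pyGetD p.2 0 0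
            let y := PySem.List.pyGetD p.2 1 0
            d.modify (max |x| |y|) [] (fun l => l ++ [p.1]))
          PySem.Dict.empty).items
        (fun p => p.1) false)
      PySem.Set.empty 0 = pvAnswer (pvP points s)
  have hfold : (s.toList.zip points).foldl
      (fun d p =>
        let x := PySem.List.pyGetD p.2 0 0
        let y := PySem.List.pyGetD p.2 1 0
        d.modify (max |x| |y|) [] (fun l => l ++ [p.1])) PySem.Dict.empty
    = ((s.toList.zip points).map (fun p => (pvCheb p.2, p.1))).foldl
        (fun d q => d.modify q.1 [] (fun l => l ++ [q.2])) PySem.Dict.empty := by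
    rw [List.foldl_map]
    rfl
  rw [hfold]
  set P := pvP points s with hP
  set Q := (s.toList.zip points).map (fun p => (pvCheb p.2, p.1)) with hQ
  set dp := Q.foldl (fun d q => d.modify q.1 [] (fun l => l ++ [q.2])) PySem.Dict.empty with hdp
  have hQfilter : ∀ c, (Q.filter (fun q => q.1 == c)).map (fun q => q.2) = pvTagsAt P c := by
    intro c
    rw [hQ, hP]
    unfold pvP pvTagsAt
    rw [List.filter_map, List.filter_map, List.map_map, List.map_map]
    rfl
  have hgetD : ∀ c, dp.getD c [] = pvTagsAt P c := by
    intro c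
    rw [hdp, PySem.Dict.getD_foldl_modify_append Q PySem.Dict.empty c]
    rw [hQfilter c]
    simp
  have hkeys : dp.keys = PySem.Set.ofList (P.map (fun e => e.2)) := by
    rw [hdp, PySem.Dict.keys_foldl_modify_key Q (fun q => q.1) []
      (fun _ q => fun l => l ++ [q.2]) PySem.Dict.empty]
    have h1 : Q.map (fun q => q.1) = P.map (fun e => e.2) := by
      rw [hQ, hP]; unfold pvP; rw [List.map_map, List.map_map]; rfl
    rw [h1]
    rfl
  have hnodup : dp.keys.Nodup := by rw [hkeys]; exact PySem.Set.nodup_ofList _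
  have hitems : dp.items
      = (PySem.Set.ofList (P.map (fun e => e.2))).map (fun k => (k, pvTagsAt P k)) := by
    rw [PySem.Dict.items_eq_map_keys dp hnodup [], hkeys]
    exact List.map_congr_left (fun k _ => by rw [hgetD k])
  set D := PySem.Set.ofList (P.map (fun e => e.2)) with hD
  set sortD := PySem.List.sorted D (fun x => x) false with hsortD
  have hsortperm : sortD.Perm D := PySem.List.sorted_perm D (fun x => x) false
  have hsortDnodup : sortD.Nodup := hsortperm.nodup_iff.mpr (PySem.Set.nodup_ofList _)
  have hsortDpair : sortD.Pairwise (· < ·) := by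
    have hle := PySem.List.sorted_pairwise D (fun x => x)
    exact (hle.and hsortDnodup).imp (fun h => lt_of_le_of_ne h.1 h.2)
  have hmemsort : ∀ c, c ∈ sortD ↔ c ∈ P.map (fun e => e.2) := by
    intro c
    rw [hsortperm.mem_iff, hD, PySem.Set.mem_ofList]
  have hsorted_items : PySem.List.sorted dp.items (fun p => p.1) false
      = sortD.map (fun k => (k, pvTagsAt P k)) := by
    apply PySem.List.sorted_eq_of_perm_of_pairwise_lt
    · rw [hitems]
      exact hsortperm.map _
    · rw [List.pairwise_map]
      exact hsortDpair
  rw [hsorted_items]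
  have hseen0 : ∀ t : Char, PySem.Set.contains PySem.Set.empty t = true
      ↔ ∃ e ∈ P, e.1 = t ∧ ∀ d' ∈ sortD, e.2 < d' := by
    intro t
    constructor
    · intro h
      exact absurd h (by simp [PySem.Set.contains_eq_listContains, PySem.Set.empty])
    · rintro ⟨e, heP, -, hlt⟩
      have : e.2 ∈ sortD := (hmemsort e.2).mpr (List.mem_map.mpr ⟨e, heP, rfl⟩)
      exact absurd (hlt e.2 this) (lt_irrefl _)
  rw [pvScan_spec P sortD PySem.Set.empty 0 hsortDpair
    (fun d hd => Or.inl ((hmemsort d).mpr hd)) hseen0]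
  have hfindmin : sortD.find? (pvBad P) = (pvCandList P).min? := by
    cases hf : sortD.find? (pvBad P) with
    | none =>
      have hnone : pvCandList P = [] := by
        rw [List.eq_nil_iff_forall_not_mem]
        intro c hc
        exact (List.find?_eq_none.mp hf c ((hmemsort c).mpr (pvCand_mem_dists P c hc)))
          ((pvBad_iff P c).mpr hc)
      rw [hnone]
      rfl
    | some L =>
      symm
      rw [List.min?_eq_some_iff]
      refine ⟨(pvBad_iff P L).mp (List.find?_some hf), ?_⟩
      intro c hc
      exact pvFind?_min sortD (pvBad P) L hsortDpair hf c
        ((hmemsort c).mpr (pvCand_mem_dists P c hc)) ((pvBad_iff P c).mpr hc)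
  rw [hfindmin]
  unfold pvAnswer
  cases hmin : (pvCandList P).min? with
  | none =>
    dsimp only
    rw [pvSum_counts sortD P hsortDnodup
      (fun e he => (hmemsort e.2).mpr (List.mem_map.mpr ⟨e, he, rfl⟩))]
    simp
  | some L =>
    dsimp only
    have hcongr : ∀ d ∈ sortD.filter (fun x => x < L),
        (pvTagsAt P d).length = (pvTagsAt (P.filter (fun e => e.2 < L)) d).length := by
      intro d hd
      have hdL : d < L := by simpa using (List.mem_filter.mp hd).2
      apply congrArg List.length
      unfold pvTagsAt
      congr 1
      rw [List.filter_filter]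
      apply List.filter_congr
      intro e _
      by_cases he : e.2 = d
      · simp [he, hdL]
      · simp [he]
    rw [List.map_congr_left hcongr]
    rw [pvSum_counts (sortD.filter (fun x => x < L)) (P.filter (fun e => e.2 < L))
      (hsortDnodup.filter _) ?cov]
    · simp
    case cov =>
      intro e he
      rcases List.mem_filter.mp he with ⟨heP, heL⟩
      rw [List.mem_filter]
      exact ⟨(hmemsort e.2).mpr (List.mem_map.mpr ⟨e, heP, rfl⟩), heL⟩

-- ===== VERDICT (by name: the statement is the Claim_ definition above) =====
theorem maxPointsInsideSquare_spec : Claim_equal_maxPointsInsideSquare := by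
  intro points s _ _
  unfold Spec_maxPointsInsideSquare
  rw [pvA_eq_answer, pvAlt_eq_answer]
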